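-- pv_equiv track=rewrite | github.com/MrBrantCode/unitest_baseline | mut_generate/mist_train_cf/cf_76834/solution.py | bottleneck
-- ===== SOURCE A (Python) =====
-- def bottleneck(lst):
--     for i in range(1, len(lst)-1):
--         if sum(lst[:i]) == 1 or sum(lst[:i]) == -1:
--             continue
--         elif sum(lst[:i]) == 0:
--             if sum(lst[i+1:]) == 0:
--                 return i
--         else:
--             product = 1
--             for j in lst[i+1:]:
--                 product *= j
--             if sum(lst[:i]) == product:
--                 return i
--     return -1
-- ===== SOURCE B (Python) =====
-- def bottleneck(lst):
--     n = len(lst)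
--     suf_sum = [0] * (n + 1)
--     suf_prod = [1] * (n + 1)
--     for k in range(n - 1, -1, -1):
--         suf_sum[k] = lst[k] + suf_sum[k + 1]
--         suf_prod[k] = lst[k] * suf_prod[k + 1]
--     pre = 0
--     for i in range(1, n - 1):
--         pre += lst[i - 1]
--         if pre == 1 or pre == -1:
--             continue
--         if pre == 0:
--             if suf_sum[i + 1] == 0:
--                 return i
--         elif pre == suf_prod[i + 1]:
--             return i
--     return -1
-- ===== Notes on version B (the rewrite author's own statement) =====
-- stated objective: faster
-- what changed: Replaced the repeated slice sums and inner product loop by precomputed suffix-sum and suffix-product tables plus a running prefix sum, turning the quadratic scan into a single linear pass.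
import Mathlib
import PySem

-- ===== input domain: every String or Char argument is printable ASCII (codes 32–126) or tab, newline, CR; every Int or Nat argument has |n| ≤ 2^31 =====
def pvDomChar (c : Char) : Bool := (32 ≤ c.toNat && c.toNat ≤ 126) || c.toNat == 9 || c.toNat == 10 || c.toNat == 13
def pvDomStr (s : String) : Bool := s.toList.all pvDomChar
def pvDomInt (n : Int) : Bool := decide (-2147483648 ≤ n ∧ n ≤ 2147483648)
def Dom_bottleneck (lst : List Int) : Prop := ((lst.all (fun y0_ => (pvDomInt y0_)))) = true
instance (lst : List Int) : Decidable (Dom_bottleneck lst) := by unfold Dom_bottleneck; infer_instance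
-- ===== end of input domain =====

-- B replaces A's per-index slice sums and inner product loop with precomputed
-- suffix-sum/suffix-product tables and a running prefix sum (one linear pass).


-- ===== PORT A =====
-- loop over i in range(1, len(lst)-1); sum(lst[:i]) recomputed by slicing at each
-- test, product of lst[i+1:] by an inner foldl, exactly as A does.
def bottleneckLoopA (lst : List Int) : List Int → Int
  | [] => -1
  | i :: rest =>
    if (PySem.List.slice lst none (some i)).sum = 1 ∨
       (PySem.List.slice lst none (some i)).sum = -1 then
      bottleneckLoopA lst rest
    else if (PySem.List.slice lst none (some i)).sum = 0 then
      if (PySem.List.slice lst (some (i + 1)) none).sum = 0 then i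
      else bottleneckLoopA lst rest
    else
      let product := (PySem.List.slice lst (some (i + 1)) none).foldl (· * ·) 1
      if (PySem.List.slice lst none (some i)).sum = product then i
      else bottleneckLoopA lst rest

def bottleneck (lst : List Int) : Int :=
  bottleneckLoopA lst (PySem.List.pyRange 1 ((lst.length : Int) - 1) 1)

-- ===== PORT B =====
-- suf_sum / suf_prod tables of Source B, filled right-to-left (entry k = sum/product
-- of lst[k:]); length lst.length + 1.
def sufSums : List Int → List Int
  | [] => [0]
  | x :: xs => (x + (sufSums xs).headI) :: sufSums xs

def sufProds : List Int → List Int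
  | [] => [1]
  | x :: xs => (x * (sufProds xs).headI) :: sufProds xs

-- the forward loop: pre is the running prefix sum; the indices i-1 (into lst) and
-- i+1 (into the tables) are in range for every i the loop visits, so pyGetD is exact.
def bottleneckLoopB (lst ss sp : List Int) : Int → List Int → Int
  | _, [] => -1
  | pre, i :: rest =>
    let pre' := pre + PySem.List.pyGetD lst (i - 1) 0
    if pre' = 1 ∨ pre' = -1 then bottleneckLoopB lst ss sp pre' rest
    else if pre' = 0 then
      if PySem.List.pyGetD ss (i + 1) 0 = 0 then i
      else bottleneckLoopB lst ss sp pre' rest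
    else
      if pre' = PySem.List.pyGetD sp (i + 1) 1 then i
      else bottleneckLoopB lst ss sp pre' rest

def bottleneck_alt (lst : List Int) : Int :=
  bottleneckLoopB lst (sufSums lst) (sufProds lst) 0
    (PySem.List.pyRange 1 ((lst.length : Int) - 1) 1)

-- ===== PRECONDITION & SPEC =====
def Spec_bottleneck (lst : List Int) (out : Int) : Prop := out = bottleneck_alt lst
instance (lst : List Int) (out : Int) : Decidable (Spec_bottleneck lst out) := by unfold Spec_bottleneck; infer_instance

-- ===== CLAIM (what is proved, stated in full; the proofs are below) =====
def Claim_equal_bottleneck : Prop := ∀ (lst : List Int), Dom_bottleneck lst → Spec_bottleneck lst (bottleneck lst)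

-- ===== LEMMAS AND PROOFS =====

theorem sufSums_headI (xs : List Int) : (sufSums xs).headI = xs.sum := by
  induction xs with
  | nil => rfl
  | cons x xs ih => simp [sufSums, ih]

theorem sufProds_headI (xs : List Int) : (sufProds xs).headI = xs.prod := by
  induction xs with
  | nil => rfl
  | cons x xs ih => simp [sufProds, ih]

theorem sufSums_getD (xs : List Int) : ∀ (k : Nat), k ≤ xs.length →
    (sufSums xs).getD k 0 = (xs.drop k).sum := by
  induction xs with
  | nil =>
    rintro k hk
    obtain rfl : k = 0 := by simpa using hk
    rfl
  | cons x xs ih =>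
    intro k hk
    cases k with
    | zero => simp [sufSums, sufSums_headI]
    | succ k =>
      simp only [sufSums, List.getD_cons_succ, List.drop_succ_cons]
      exact ih k (by simpa using hk)

theorem sufProds_getD (xs : List Int) : ∀ (k : Nat), k ≤ xs.length →
    (sufProds xs).getD k 1 = (xs.drop k).prod := by
  induction xs with
  | nil =>
    rintro k hk
    obtain rfl : k = 0 := by simpa using hk
    rfl
  | cons x xs ih =>
    intro k hk
    cases k with
    | zero => simp [sufProds, sufProds_headI]
    | succ k =>
      simp only [sufProds, List.getD_cons_succ, List.drop_succ_cons]
      exact ih k (by simpa using hk)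

-- both loops agree when B's accumulator carries the prefix sum of lst[:i-1]
theorem loop_eq (lst : List Int) : ∀ (fuel : Nat) (i : Int), 1 ≤ i →
    fuel = (((lst.length : Int) - 1) - i).toNat →
    bottleneckLoopA lst (PySem.List.pyRange i ((lst.length : Int) - 1) 1)
      = bottleneckLoopB lst (sufSums lst) (sufProds lst)
          ((lst.take (i - 1).toNat).sum)
          (PySem.List.pyRange i ((lst.length : Int) - 1) 1) := by
  intro fuel
  induction fuel with
  | zero =>
    intro i hi hf
    have hle : (lst.length : Int) - 1 ≤ i := by omega
    rw [PySem.List.pyRange_one_eq_nil hle]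
    rfl
  | succ fuel ih =>
    intro i hi hf
    have hlt : i < (lst.length : Int) - 1 := by omega
    have hlen : i + 1 < (lst.length : Int) := by omega
    rw [PySem.List.pyRange_one_cons hlt]
    -- index facts
    have him1 : (i - 1).toNat < lst.length := by omega
    have hitn : i.toNat = (i - 1).toNat + 1 := by omega
    -- B's updated accumulator equals sum(lst[:i])
    have hget : PySem.List.pyGetD lst (i - 1) 0 = lst[(i - 1).toNat] := by
      rw [PySem.List.pyGetD_eq_getElem lst 0 (by omega) (by omega)]
    have hpre : (lst.take (i - 1).toNat).sum + PySem.List.pyGetD lst (i - 1) 0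
        = (lst.take i.toNat).sum := by
      rw [hget, hitn, List.sum_take_succ lst _ him1]
    -- A's prefix-slice sum
    have hA : (PySem.List.slice lst none (some i)).sum = (lst.take i.toNat).sum := by
      rw [PySem.List.slice_to lst (show (0:Int) ≤ i by omega)]
    -- A's suffix-slice
    have hdrop : PySem.List.slice lst (some (i + 1)) none = lst.drop (i + 1).toNat := by
      rw [PySem.List.slice_from lst (show (0:Int) ≤ i + 1 by omega)]
    have hk1 : (i + 1).toNat ≤ lst.length := by omega
    have hcast : (i + 1) = (((i + 1).toNat : Nat) : Int) := by omega
    have hS : PySem.List.pyGetD (sufSums lst) (i + 1) 0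
        = (PySem.List.slice lst (some (i + 1)) none).sum := by
      conv_lhs => rw [hcast, PySem.List.pyGetD_natCast]
      rw [sufSums_getD lst _ hk1, hdrop]
    have hP : PySem.List.pyGetD (sufProds lst) (i + 1) 1
        = (PySem.List.slice lst (some (i + 1)) none).foldl (· * ·) 1 := by
      conv_lhs => rw [hcast, PySem.List.pyGetD_natCast]
      rw [sufProds_getD lst _ hk1, hdrop]
      exact List.prod_eq_foldl
    -- one step of each loop
    have hrec := ih (i + 1) (by omega) (by omega)
    have hpre' : (lst.take (i + 1 - 1).toNat).sum = (lst.take i.toNat).sum := by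
      norm_num
    rw [hpre'] at hrec
    simp only [bottleneckLoopA, bottleneckLoopB, hA, hpre, hS, hP]
    split_ifs <;> first | rfl | exact hrec

theorem bottleneck_eq_alt (lst : List Int) : bottleneck lst = bottleneck_alt lst := by
  unfold bottleneck bottleneck_alt
  have h := loop_eq lst (((lst.length : Int) - 1) - 1).toNat 1 le_rfl rfl
  simpa using h

-- ===== VERDICT (by name: the statement is the Claim_ definition above) =====
theorem bottleneck_spec : Claim_equal_bottleneck := by
  intro lst _
  unfold Spec_bottleneck
  exact bottleneck_eq_alt lst
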